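-- pv_equiv track=rewrite | github.com/saman1000/exercises | python-practice/src/advanced-recursion.py | word_game
-- ===== SOURCE A (Python) =====
-- def word_game(words):
--     result = []
--     word_length = len(words)
--
--     def backtrack(index=0, path=[]):
--         if index == word_length:
--             result.append("".join(path))
--             return
--         for one_char in words[index]:
--             path.append(one_char)
--             backtrack(index + 1, path)
--             path.pop()
--
--     words = [sorted(w) for w in words]
--     backtrack()
--     return result
-- ===== SOURCE B (Python) =====
-- def word_game(words):
--     acc = [""]
--     for w in words:
--         sw = sorted(w)
--         acc = [prefix + ch for prefix in acc for ch in sw]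
--     return acc
-- ===== Notes on version B (the rewrite author's own statement) =====
-- stated objective: simpler
-- what changed: Replaces the recursive backtracking with an explicit mutable path by an iterative cross-product fold that rebuilds a list of prefixes word by word.
import Mathlib
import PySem

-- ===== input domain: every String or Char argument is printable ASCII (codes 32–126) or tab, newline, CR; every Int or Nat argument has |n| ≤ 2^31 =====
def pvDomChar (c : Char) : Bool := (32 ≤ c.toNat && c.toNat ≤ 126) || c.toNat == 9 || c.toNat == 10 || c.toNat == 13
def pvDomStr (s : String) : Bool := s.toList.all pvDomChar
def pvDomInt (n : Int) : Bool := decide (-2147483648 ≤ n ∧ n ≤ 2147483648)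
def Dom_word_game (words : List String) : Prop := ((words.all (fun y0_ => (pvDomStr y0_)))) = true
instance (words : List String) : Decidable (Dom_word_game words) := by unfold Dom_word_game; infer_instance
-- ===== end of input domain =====

-- B replaces A's recursive backtracking (mutable path, per-index recursion) by an
-- iterative cross-product fold over a list of prefixes; objective: simpler.

-- ===== PORT A =====
-- A's inner `backtrack`: recursion over the remaining (sorted) words, carrying the path;
-- the for-loop over the current word's characters is a foldl accumulating the result list.
def wgBacktrack : List (List Char) → List Char → List String
  | [], path => [String.ofList path]
  | w :: rest, path => w.foldl (fun res c => res ++ wgBacktrack rest (path ++ [c])) []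

def word_game (words : List String) : List String :=
  -- words = [sorted(w) for w in words]; backtrack(0, [])
  wgBacktrack (words.map (fun w => PySem.List.sorted w.toList (fun c => c) false)) []

-- ===== PORT B =====
def word_game_alt (words : List String) : List String :=
  words.foldl
    (fun acc w =>
      let sw := PySem.List.sorted w.toList (fun c => c) false
      acc.flatMap (fun prefixStr => sw.map (fun ch => prefixStr ++ String.ofList [ch])))
    [""]

-- ===== PRECONDITION & SPEC =====
def Spec_word_game (words : List String) (out : List String) : Prop := out = word_game_alt words
instance (words : List String) (out : List String) : Decidable (Spec_word_game words out) := by unfold Spec_word_game; infer_instance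

-- ===== CLAIM (what is proved, stated in full; the proofs are below) =====
def Claim_equal_word_game : Prop := ∀ (words : List String), Dom_word_game words → Spec_word_game words (word_game words)

-- ===== LEMMAS AND PROOFS =====

theorem wgBacktrack_path (ws : List (List Char)) (path : List Char) :
    wgBacktrack ws path = (wgBacktrack ws []).map (fun s => String.ofList path ++ s) := by
  induction ws generalizing path with
  | nil => simp [wgBacktrack]
  | cons w rest ih =>
    simp only [wgBacktrack, PySem.List.foldl_append_eq_flatMap, List.nil_append,
      List.map_flatMap]
    refine List.flatMap_congr (fun c _ => ?_)
    rw [ih (path ++ [c]), ih [c], List.map_map]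
    refine List.map_congr_left (fun s _ => ?_)
    simp [← String.append_assoc]

theorem word_game_alt_foldl (ws : List String) (acc : List String) :
    ws.foldl
      (fun acc w =>
        let sw := PySem.List.sorted w.toList (fun c => c) false
        acc.flatMap (fun prefixStr => sw.map (fun ch => prefixStr ++ String.ofList [ch])))
      acc
    = acc.flatMap (fun p =>
        (wgBacktrack (ws.map (fun w => PySem.List.sorted w.toList (fun c => c) false)) []).map
          (fun s => p ++ s)) := by
  induction ws generalizing acc with
  | nil => simp [wgBacktrack]
  | cons w rest ih =>
    rw [List.foldl_cons, ih]
    simp only [List.map_cons, wgBacktrack, PySem.List.foldl_append_eq_flatMap,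
      List.nil_append, List.flatMap_assoc, List.map_flatMap, List.flatMap_map]
    refine List.flatMap_congr (fun p _ => ?_)
    refine List.flatMap_congr (fun c _ => ?_)
    rw [wgBacktrack_path _ [c], List.map_map]
    refine List.map_congr_left (fun s _ => ?_)
    simp [Function.comp, String.append_assoc]

-- ===== VERDICT (by name: the statement is the Claim_ definition above) =====
theorem word_game_spec : Claim_equal_word_game := by
  intro words _
  unfold Spec_word_game word_game word_game_alt
  rw [word_game_alt_foldl]
  simp
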